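-- pv_equiv track=rewrite | github.com/DanisSharafiev/avito-test | inference.py | calculate_indexes
-- ===== SOURCE A (Python) =====
-- def calculate_indexes(text):
--     result = []
--     counter = 0
--     for i, item in enumerate(text):
--         if item == " ":
--             result.append(counter)
--         else:
--             counter += 1
--     return result
-- ===== SOURCE B (Python) =====
-- def calculate_indexes(text):
--     spaces = [i for i, ch in enumerate(text) if ch == ' ']
--     return [i - j for j, i in enumerate(spaces)]
-- ===== Notes on version B (the rewrite author's own statement) =====
-- stated objective: alternative
-- what changed: Replaces A's running non-space counter with a two-stage closed form: collect the indices of the spaces, then for the j-th space at index i return i - j (index minus number of earlier spaces).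
import Mathlib
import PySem

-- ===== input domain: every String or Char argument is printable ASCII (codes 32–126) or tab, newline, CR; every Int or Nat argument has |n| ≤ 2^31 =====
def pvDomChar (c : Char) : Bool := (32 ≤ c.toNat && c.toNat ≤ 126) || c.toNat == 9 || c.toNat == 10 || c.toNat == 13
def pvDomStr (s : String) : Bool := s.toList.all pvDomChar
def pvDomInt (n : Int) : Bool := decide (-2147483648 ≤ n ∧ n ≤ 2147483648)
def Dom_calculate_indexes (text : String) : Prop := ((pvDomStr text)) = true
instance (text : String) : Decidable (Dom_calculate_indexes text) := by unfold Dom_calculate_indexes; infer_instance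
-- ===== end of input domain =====

-- B drops A's running counter: it collects the space positions and uses the closed form i - j (position minus rank) for the j-th space; alternative decomposition, same cost.


-- ===== PORT A =====
-- for i, item in enumerate(text): the index i is unused, so the fold runs over the characters
def calculate_indexes (text : String) : List Int :=
  (text.toList.foldl
    (fun (st : List Int × Int) item =>
      if item = ' ' then (st.1 ++ [st.2], st.2) else (st.1, st.2 + 1))
    ([], 0)).1

-- ===== PORT B =====
-- spaces = [i for i, ch in enumerate(text) if ch == ' ']; [i - j for j, i in enumerate(spaces)]
def calculate_indexes_alt (text : String) : List Int :=
  let spaces := ((PySem.List.enumerate text.toList).filter (fun p => p.2 = ' ')).map (·.1)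
  (PySem.List.enumerate spaces).map (fun p => p.2 - p.1)

-- ===== PRECONDITION & SPEC =====
def Spec_calculate_indexes (text : String) (out : List Int) : Prop := out = calculate_indexes_alt text
instance (text : String) (out : List Int) : Decidable (Spec_calculate_indexes text out) := by unfold Spec_calculate_indexes; infer_instance

-- ===== CLAIM =====
def Claim_equal_calculate_indexes : Prop := ∀ (text : String), Dom_calculate_indexes text → Spec_calculate_indexes text (calculate_indexes text)

-- ===== LEMMAS AND PROOFS =====

-- reference function: the values A appends, scanning chars with counter c
def pvF : List Char → Int → List Int
  | [], _ => []
  | x :: xs, c => if x = ' ' then c :: pvF xs c else pvF xs (c + 1)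

theorem pvA_fold (l : List Char) (acc : List Int) (c : Int) :
    (l.foldl
      (fun (st : List Int × Int) item =>
        if item = ' ' then (st.1 ++ [st.2], st.2) else (st.1, st.2 + 1))
      (acc, c)).1 = acc ++ pvF l c := by
  induction l generalizing acc c with
  | nil => simp [pvF]
  | cons x xs ih =>
    by_cases hx : x = ' ' <;> simp [pvF, hx, List.foldl_cons, ih]

-- B's closed form i - j over enumerated space positions equals A's counter scan:
-- the counter equals (current index k) - (number of spaces seen, j), i.e. c = k - j.
theorem pvB_key (l : List Char) : ∀ (k j : Int),
    (PySem.List.enumerate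
        (((PySem.List.enumerate l k).filter (fun p => p.2 = ' ')).map (·.1)) j).map
      (fun p => p.2 - p.1) = pvF l (k - j) := by
  induction l with
  | nil => intro k j; simp [PySem.List.enumerate_nil, pvF]
  | cons x xs ih =>
    intro k j
    by_cases hx : x = ' '
    · subst hx
      simp only [PySem.List.enumerate_cons, List.filter_cons, decide_true, if_true,
        List.map_cons, pvF]
      rw [ih (k + 1) (j + 1)]
      have h1 : k + 1 - (j + 1) = k - j := by ring
      rw [h1]
    · have hx' : decide ((x :: xs).head (by simp) = ' ') = false := by simpa using hx
      simp only [PySem.List.enumerate_cons, List.filter_cons]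
      simp only [hx, decide_false, Bool.false_eq_true, if_neg, not_false_iff]
      rw [ih (k + 1) j]
      have : k + 1 - j = k - j + 1 := by ring
      simp [pvF, hx, this]

-- ===== VERDICT =====
theorem calculate_indexes_spec : Claim_equal_calculate_indexes := by
  intro text _
  unfold Spec_calculate_indexes calculate_indexes calculate_indexes_alt
  rw [pvA_fold, pvB_key]
  norm_num
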